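-- pv_equiv track=rewrite | github.com/naturalsolutions/ecoteka | backend/app/app/tests/utils/security.py | users_parameters
-- ===== SOURCE A (Python) =====
-- from typing import Dict, List, Tuple
--
-- def users_parameters(permissions: Dict[str, List[str]]) -> List[Tuple]:
--     organizations_mode = ['private', 'open', 'participatory']
--     roles = ["admin", "manager", "contributor", "reader"]
--     status_codes: List[Tuple] = []
--     default_permissions: Dict[str, Dict[str, int]] = {}
--
--     for organization_mode in organizations_mode:
--         default_permissions[organization_mode] = {}
--         for role in roles:
--             default_permissions[organization_mode][role] = 403
--
--     for organization_mode in permissions.keys():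
--         if organization_mode in organizations_mode:
--             for role in permissions[organization_mode]:
--                 if role in roles:
--                     default_permissions[organization_mode][role] = 200
--
--     for organization_mode in default_permissions.keys():
--         for role in default_permissions[organization_mode].keys():
--             status_code = default_permissions[organization_mode][role]
--             status_codes.append((organization_mode, role, status_code))
--
--     return status_codes
-- ===== SOURCE B (Python) =====
-- from typing import Dict, List, Tuple
--
-- def users_parameters(permissions: Dict[str, List[str]]) -> List[Tuple]:
--     return [
--         (organization_mode, role,
--          200 if role in permissions.get(organization_mode, []) else 403)
--         for organization_mode in ['private', 'open', 'participatory']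
--         for role in ["admin", "manager", "contributor", "reader"]
--     ]
-- ===== Notes on version B (the rewrite author's own statement) =====
-- stated objective: simpler
-- what changed: Replaces the three-phase build (fill a nested default dict with 403, patch granted entries to 200, then flatten it back out) with a single nested comprehension over the constant mode/role lists that emits each (mode, role, 200-or-403) tuple directly via a membership test.
import Mathlib
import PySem

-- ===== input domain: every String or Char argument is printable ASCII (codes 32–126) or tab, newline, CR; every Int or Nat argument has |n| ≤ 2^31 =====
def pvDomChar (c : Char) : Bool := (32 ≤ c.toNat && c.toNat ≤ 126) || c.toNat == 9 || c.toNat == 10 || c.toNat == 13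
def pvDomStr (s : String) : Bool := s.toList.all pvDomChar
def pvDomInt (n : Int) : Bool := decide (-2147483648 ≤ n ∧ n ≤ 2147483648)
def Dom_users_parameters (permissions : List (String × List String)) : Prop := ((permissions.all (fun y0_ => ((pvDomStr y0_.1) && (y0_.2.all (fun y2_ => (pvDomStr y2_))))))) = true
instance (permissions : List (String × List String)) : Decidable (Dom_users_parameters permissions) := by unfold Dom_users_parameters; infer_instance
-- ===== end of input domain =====

-- B drops A's three-phase nested-dict build (fill 403 / patch 200 / flatten) for one direct
-- nested comprehension over the constant mode/role lists: simpler, same exact output.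

-- ===== PORT A =====
-- the two constant lists of A (B's Python repeats the same literals)
def pvOrgModes : List String := ["private", "open", "participatory"]
def pvRoles : List String := ["admin", "manager", "contributor", "reader"]

-- A phase 1: fill default_permissions[mode][role] = 403
def pvFill : PySem.Dict String (PySem.Dict String Int) :=
  pvOrgModes.foldl
    (fun dp organization_mode =>
      pvRoles.foldl
        (fun dp role =>
          dp.insert organization_mode
            ((dp.getD organization_mode PySem.Dict.empty).insert role 403))
        (dp.insert organization_mode PySem.Dict.empty))
    PySem.Dict.empty

-- A phase 2: for mode in permissions.keys(): for role in permissions[mode]: patch to 200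
def pvGrant (permissions : List (String × List String)) :
    PySem.Dict String (PySem.Dict String Int) :=
  (permissions.map (·.1)).foldl
    (fun dp organization_mode =>
      if organization_mode ∈ pvOrgModes then
        ((PySem.Dict.mk permissions).getD organization_mode []).foldl
          (fun dp role =>
            if role ∈ pvRoles then
              dp.insert organization_mode
                ((dp.getD organization_mode PySem.Dict.empty).insert role 200)
            else dp)
          dp
      else dp)
    pvFill

-- A phase 3: flatten the nested dict into the status_codes list
def users_parameters (permissions : List (String × List String)) :
    List (String × String × Int) :=
  let default_permissions := pvGrant permissions
  default_permissions.keys.foldl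
    (fun status_codes organization_mode =>
      ((default_permissions.getD organization_mode PySem.Dict.empty).keys).foldl
        (fun status_codes role =>
          status_codes ++ [(organization_mode, role,
            (default_permissions.getD organization_mode PySem.Dict.empty).getD role 0)])
        status_codes)
    []

-- ===== PORT B =====
def users_parameters_alt (permissions : List (String × List String)) :
    List (String × String × Int) :=
  pvOrgModes.flatMap (fun organization_mode =>
    pvRoles.map (fun role =>
      (organization_mode, role,
        if role ∈ (PySem.Dict.mk permissions).getD organization_mode [] then (200 : Int)
        else 403)))

-- ===== PRECONDITION & SPEC =====
def Spec_users_parameters (permissions : List (String × List String)) (out : List (String × String × Int)) : Prop := out = users_parameters_alt permissions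
instance (permissions : List (String × List String)) (out : List (String × String × Int)) : Decidable (Spec_users_parameters permissions out) := by unfold Spec_users_parameters; infer_instance

-- ===== CLAIM (what is proved, stated in full; the proofs are below) =====
def Claim_equal_users_parameters : Prop := ∀ (permissions : List (String × List String)), Dom_users_parameters permissions → Spec_users_parameters permissions (users_parameters permissions)

-- ===== LEMMAS AND PROOFS =====

-- invariant on the nested dict: outer keys are the three modes, inner keys the four roles
def pvInv (dp : PySem.Dict String (PySem.Dict String Int)) : Prop :=
  dp.keys = pvOrgModes ∧
    ∀ m ∈ pvOrgModes, (dp.getD m PySem.Dict.empty).keys = pvRoles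

lemma pvFill_inv : pvInv pvFill := by
  constructor
  · decide
  · decide

lemma pvFill_getD : ∀ m ∈ pvOrgModes, ∀ r ∈ pvRoles,
    ((pvFill.getD m PySem.Dict.empty).getD r 0) = 403 := by decide

lemma pvInv_insert (dp : PySem.Dict String (PySem.Dict String Int))
    (k r : String) (hk : k ∈ pvOrgModes) (hr : r ∈ pvRoles) (h : pvInv dp)
    (v : Int) :
    pvInv (dp.insert k ((dp.getD k PySem.Dict.empty).insert r v)) := by
  have hck : dp.contains k := (PySem.Dict.contains_iff_mem_keys dp k).mpr (h.1 ▸ hk)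
  refine ⟨?_, ?_⟩
  · rw [PySem.Dict.keys_insert_of_contains _ _ hck, h.1]
  · intro m hm
    rw [PySem.Dict.getD_insert]
    by_cases hmk : m = k
    · subst hmk
      rw [if_pos rfl]
      have hcr : (dp.getD m PySem.Dict.empty).contains r :=
        (PySem.Dict.contains_iff_mem_keys _ r).mpr ((h.2 m hm) ▸ hr)
      rw [PySem.Dict.keys_insert_of_contains _ _ hcr, h.2 m hm]
    · rw [if_neg hmk]; exact h.2 m hm

lemma pvInner_inv (k : String) (hk : k ∈ pvOrgModes) (vs : List String)
    (dp : PySem.Dict String (PySem.Dict String Int)) (h : pvInv dp) :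
    pvInv (vs.foldl
      (fun dp role =>
        if role ∈ pvRoles then
          dp.insert k ((dp.getD k PySem.Dict.empty).insert role 200)
        else dp) dp) := by
  induction vs generalizing dp with
  | nil => exact h
  | cons v vs ih =>
    rw [List.foldl_cons]
    by_cases hv : v ∈ pvRoles
    · rw [if_pos hv]; exact ih _ (pvInv_insert dp k v hk hv h 200)
    · rw [if_neg hv]; exact ih _ h

lemma pvOuter_inv (permissions : List (String × List String)) (ks : List String)
    (dp : PySem.Dict String (PySem.Dict String Int)) (h : pvInv dp) :
    pvInv (ks.foldl
      (fun dp organization_mode =>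
        if organization_mode ∈ pvOrgModes then
          ((PySem.Dict.mk permissions).getD organization_mode []).foldl
            (fun dp role =>
              if role ∈ pvRoles then
                dp.insert organization_mode
                  ((dp.getD organization_mode PySem.Dict.empty).insert role 200)
              else dp) dp
        else dp) dp) := by
  induction ks generalizing dp with
  | nil => exact h
  | cons k ks ih =>
    rw [List.foldl_cons]
    by_cases hk : k ∈ pvOrgModes
    · rw [if_pos hk]; exact ih _ (pvInner_inv k hk _ dp h)
    · rw [if_neg hk]; exact ih _ h

lemma pvInner_getD (k : String) (vs : List String)
    (dp : PySem.Dict String (PySem.Dict String Int)) (m r : String) :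
    (((vs.foldl
        (fun dp role =>
          if role ∈ pvRoles then
            dp.insert k ((dp.getD k PySem.Dict.empty).insert role 200)
          else dp) dp).getD m PySem.Dict.empty).getD r 0)
      = if m = k ∧ r ∈ vs ∧ r ∈ pvRoles then 200
        else ((dp.getD m PySem.Dict.empty).getD r 0) := by
  induction vs generalizing dp with
  | nil => simp
  | cons v vs ih =>
    rw [List.foldl_cons]
    by_cases hv : v ∈ pvRoles
    · rw [if_pos hv, ih, PySem.Dict.getD_insert]
      by_cases hmk : m = k
      · subst hmk
        rw [if_pos rfl, PySem.Dict.getD_insert]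
        simp only [List.mem_cons]
        split_ifs <;> first | rfl | tauto | simp_all
      · simp [hmk]
    · rw [if_neg hv, ih]
      simp only [List.mem_cons]
      have hiff : (m = k ∧ (r = v ∨ r ∈ vs) ∧ r ∈ pvRoles) ↔ (m = k ∧ r ∈ vs ∧ r ∈ pvRoles) := by
        constructor
        · rintro ⟨h1, h2 | h2, h3⟩
          · exact absurd (h2 ▸ h3) hv
          · exact ⟨h1, h2, h3⟩
        · rintro ⟨h1, h2, h3⟩; exact ⟨h1, Or.inr h2, h3⟩
      rw [if_congr hiff rfl rfl]

lemma pvOuter_getD (permissions : List (String × List String)) (ks : List String)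
    (dp : PySem.Dict String (PySem.Dict String Int)) (m r : String) :
    (((ks.foldl
        (fun dp organization_mode =>
          if organization_mode ∈ pvOrgModes then
            ((PySem.Dict.mk permissions).getD organization_mode []).foldl
              (fun dp role =>
                if role ∈ pvRoles then
                  dp.insert organization_mode
                    ((dp.getD organization_mode PySem.Dict.empty).insert role 200)
                else dp) dp
          else dp) dp).getD m PySem.Dict.empty).getD r 0)
      = if m ∈ ks ∧ m ∈ pvOrgModes ∧ r ∈ (PySem.Dict.mk permissions).getD m [] ∧ r ∈ pvRoles
        then 200 else ((dp.getD m PySem.Dict.empty).getD r 0) := by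
  induction ks generalizing dp with
  | nil => simp
  | cons k ks ih =>
    rw [List.foldl_cons]
    by_cases hk : k ∈ pvOrgModes
    · rw [if_pos hk, ih, pvInner_getD]
      by_cases hmk : m = k
      · subst hmk
        simp only [List.mem_cons]
        split_ifs <;> first | rfl | tauto
      · simp only [List.mem_cons]
        split_ifs <;> first | rfl | tauto
    · rw [if_neg hk, ih]
      by_cases hmk : m = k
      · subst hmk
        simp [hk]
      · simp only [List.mem_cons]
        split_ifs <;> first | rfl | tauto

lemma pvVals_nil (permissions : List (String × List String)) (m : String)
    (h : m ∉ permissions.map (·.1)) :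
    (PySem.Dict.mk permissions).getD m [] = [] := by
  induction permissions with
  | nil => rfl
  | cons p ps ih =>
    have hne : ¬ (p.1 == m) := by
      simp only [beq_iff_eq]
      intro he
      exact h (by simp [he])
    rw [PySem.Dict.getD_eq_get?_getD, PySem.Dict.get?_mk_cons, if_neg hne,
      ← PySem.Dict.getD_eq_get?_getD]
    exact ih (fun hx => h (by simp at hx ⊢; tauto))

lemma pvValAt (permissions : List (String × List String)) (m r : String)
    (hm : m ∈ pvOrgModes) (hr : r ∈ pvRoles) :
    (((pvGrant permissions).getD m PySem.Dict.empty).getD r 0)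
      = if r ∈ (PySem.Dict.mk permissions).getD m [] then 200 else 403 := by
  unfold pvGrant
  rw [pvOuter_getD]
  by_cases hrm : r ∈ (PySem.Dict.mk permissions).getD m []
  · have hks : m ∈ permissions.map (·.1) := by
      by_contra hk
      rw [pvVals_nil permissions m hk] at hrm
      exact absurd hrm (List.not_mem_nil)
    simp [hks, hm, hrm, hr]
  · have hno : ¬ (m ∈ permissions.map (·.1) ∧ m ∈ pvOrgModes ∧ r ∈ (PySem.Dict.mk permissions).getD m [] ∧ r ∈ pvRoles) := by
      rintro ⟨_, _, hx, _⟩; exact hrm hx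
    rw [if_neg hno, if_neg hrm]
    exact pvFill_getD m hm r hr

lemma pvMain (permissions : List (String × List String)) :
    users_parameters permissions = users_parameters_alt permissions := by
  have hinv : pvInv (pvGrant permissions) :=
    pvOuter_inv permissions _ pvFill pvFill_inv
  unfold users_parameters users_parameters_alt
  simp only []
  rw [hinv.1]
  simp only [pvOrgModes, List.foldl_cons, List.foldl_nil]
  rw [hinv.2 "private" (by decide), hinv.2 "open" (by decide),
    hinv.2 "participatory" (by decide)]
  simp only [pvRoles, List.foldl_cons, List.foldl_nil, List.flatMap_cons,
    List.flatMap_nil, List.map_cons, List.map_nil]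
  rw [pvValAt permissions "private" "admin" (by decide) (by decide),
    pvValAt permissions "private" "manager" (by decide) (by decide),
    pvValAt permissions "private" "contributor" (by decide) (by decide),
    pvValAt permissions "private" "reader" (by decide) (by decide),
    pvValAt permissions "open" "admin" (by decide) (by decide),
    pvValAt permissions "open" "manager" (by decide) (by decide),
    pvValAt permissions "open" "contributor" (by decide) (by decide),
    pvValAt permissions "open" "reader" (by decide) (by decide),
    pvValAt permissions "participatory" "admin" (by decide) (by decide),
    pvValAt permissions "participatory" "manager" (by decide) (by decide),
    pvValAt permissions "participatory" "contributor" (by decide) (by decide),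
    pvValAt permissions "participatory" "reader" (by decide) (by decide)]
  simp

-- ===== VERDICT (by name: the statement is the Claim_ definition above) =====
theorem users_parameters_spec : Claim_equal_users_parameters := by
  intro permissions _
  unfold Spec_users_parameters
  exact pvMain permissions
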